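-- pv_equiv track=rewrite | github.com/bc36/leetcode | lc_Python/lc2100_2199.py | recoverArray
-- ===== SOURCE A (Python) =====
-- import bisect, collections, functools, math, itertools, heapq
-- from typing import List, Optional
--
-- def recoverArray(nums: List[int]) -> List[int]:
--     nums.sort()
--     for i in range(1, len(nums)):
--         if (nums[i] - nums[0]) % 2 == 1 or nums[i] == nums[i - 1]:
--             continue
--         k = (nums[i] - nums[0]) // 2
--         cnt = collections.Counter(nums)
--         f = True
--         ans = []
--         for v in nums:
--             if cnt[v] == 0:
--                 continue
--             if cnt[v + k * 2] == 0:
--                 f = False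
--                 break
--             cnt[v] -= 1
--             cnt[v + k * 2] -= 1
--             ans.append(v + k)
--         if f:
--             return ans
-- ===== SOURCE B (Python) =====
-- def recoverArray(nums):
--     # Like A, sorts nums in place; returns None when no valid k exists.
--     nums.sort()
--     for i in range(1, len(nums)):
--         if (nums[i] - nums[0]) % 2 == 1 or nums[i] == nums[i - 1]:
--             continue
--         k = (nums[i] - nums[0]) // 2
--         rest = list(nums)
--         ans = []
--         ok = True
--         while rest:
--             v = rest.pop(0)
--             partner = v + 2 * k
--             if partner in rest:
--                 rest.remove(partner)
--                 ans.append(v + k)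
--             else:
--                 ok = False
--                 break
--         if ok:
--             return ans
-- ===== Notes on version B (the rewrite author's own statement) =====
-- stated objective: simpler
-- what changed: B verifies each candidate k by greedily consuming an explicit remainder list (pop the smallest element, remove its partner v+2k) instead of A's Counter with skip-on-zero bookkeeping.
import Mathlib
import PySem

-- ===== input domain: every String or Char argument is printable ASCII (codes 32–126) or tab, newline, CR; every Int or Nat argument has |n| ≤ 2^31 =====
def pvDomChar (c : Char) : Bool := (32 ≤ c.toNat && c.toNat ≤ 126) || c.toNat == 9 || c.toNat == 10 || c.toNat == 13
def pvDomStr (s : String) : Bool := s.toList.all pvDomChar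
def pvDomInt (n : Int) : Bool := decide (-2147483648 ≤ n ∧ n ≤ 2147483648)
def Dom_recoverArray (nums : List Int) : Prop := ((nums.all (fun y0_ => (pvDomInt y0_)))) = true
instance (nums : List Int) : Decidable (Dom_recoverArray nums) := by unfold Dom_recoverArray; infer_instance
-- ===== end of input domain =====

-- B replaces A's Counter bookkeeping by an explicit remainder list (pop the head, remove its partner);
-- objective: simpler.  Both Pythons sort `nums` in place; the equivalence proved here is about the return value
-- (the in-place sort is identical in A and B).  A returns None when no k works, hence Option.

-- ===== PORT A =====
-- cnt[x] -= 1  (Counter/dict __setitem__: overwrite keeps position, default 0)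
def pvDec (cnt : PySem.Dict Int Int) (x : Int) : PySem.Dict Int Int :=
  cnt.insert x (cnt.getD x 0 - 1)

-- the inner `for v in nums` loop of A (f/break/ans encoded in the Option result)
def pvLoopA (k : Int) : List Int → PySem.Dict Int Int → List Int → Option (List Int)
  | [], _, ans => some ans
  | v :: t, cnt, ans =>
    if cnt.getD v 0 == 0 then pvLoopA k t cnt ans
    else if cnt.getD (v + k * 2) 0 == 0 then none
    else pvLoopA k t (pvDec (pvDec cnt v) (v + k * 2)) (ans ++ [v + k])

-- the outer `for i in range(1, len(nums))` loop of A (s is the sorted list; indices always in range)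
def pvOuterA (s : List Int) : List Int → Option (List Int)
  | [] => none
  | i :: is =>
    if PySem.Int.mod (PySem.List.pyGetD s i 0 - PySem.List.pyGetD s 0 0) 2 == 1
        || PySem.List.pyGetD s i 0 == PySem.List.pyGetD s (i - 1) 0 then
      pvOuterA s is
    else
      let k := PySem.Int.floordiv (PySem.List.pyGetD s i 0 - PySem.List.pyGetD s 0 0) 2
      match pvLoopA k s (PySem.Dict.counter s) [] with
      | some ans => some ans
      | none => pvOuterA s is

def recoverArray (nums : List Int) : Option (List Int) :=
  let s := PySem.List.sorted nums (fun x => x)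
  pvOuterA s (PySem.List.pyRange 1 (s.length : Int))

-- ===== PORT B =====
-- termination helper for pvLoopB: removing an element shortens the list
theorem pvRemove?_length {rest rest' : List Int} {x : Int}
    (h : PySem.List.remove? rest x = some rest') : rest'.length < rest.length := by
  have hx : x ∈ rest := by
    by_contra hmem
    rw [(PySem.List.remove?_eq_none_iff rest x).mpr hmem] at h
    simp at h
  rw [PySem.List.remove?_eq_some_erase rest x hx] at h
  cases h
  have := List.length_erase_of_mem hx
  have := List.length_pos_of_mem hx
  omega

-- the inner `while rest:` loop of B: pop the head, remove its partner from the remainder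
def pvLoopB (k : Int) (rest : List Int) (ans : List Int) : Option (List Int) :=
  match rest with
  | [] => some ans
  | v :: rest₁ =>
    if rest₁.contains (v + 2 * k) then
      match h : PySem.List.remove? rest₁ (v + 2 * k) with
      | some rest₂ => pvLoopB k rest₂ (ans ++ [v + k])
      | none => none
    else none
termination_by rest.length
decreasing_by exact Nat.lt_succ_of_lt (pvRemove?_length h)

-- the outer candidate loop of B (same guard and k as B's Python source)
def pvOuterB (s : List Int) : List Int → Option (List Int)
  | [] => none
  | i :: is =>
    if PySem.Int.mod (PySem.List.pyGetD s i 0 - PySem.List.pyGetD s 0 0) 2 == 1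
        || PySem.List.pyGetD s i 0 == PySem.List.pyGetD s (i - 1) 0 then
      pvOuterB s is
    else
      let k := PySem.Int.floordiv (PySem.List.pyGetD s i 0 - PySem.List.pyGetD s 0 0) 2
      match pvLoopB k s [] with
      | some ans => some ans
      | none => pvOuterB s is

def recoverArray_alt (nums : List Int) : Option (List Int) :=
  let s := PySem.List.sorted nums (fun x => x)
  pvOuterB s (PySem.List.pyRange 1 (s.length : Int))

-- ===== PRECONDITION & SPEC =====
def Spec_recoverArray (nums : List Int) (out : Option (List Int)) : Prop := out = recoverArray_alt nums
instance (nums : List Int) (out : Option (List Int)) : Decidable (Spec_recoverArray nums out) := by unfold Spec_recoverArray; infer_instance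

-- ===== CLAIM (what is proved, stated in full; the proofs are below) =====
def Claim_equal_recoverArray : Prop := ∀ (nums : List Int), Dom_recoverArray nums → Spec_recoverArray nums (recoverArray nums)

-- ===== LEMMAS AND PROOFS =====

-- Core invariant: A's Counter scan over the sorted list s, with counts equal to those of a sorted
-- sub-multiset r of s, computes exactly B's remove-greedy on r.
theorem pvLoop_eq (k : Int) (hk : 0 < k) :
    ∀ (s : List Int), s.Pairwise (· ≤ ·) →
    ∀ (r : List Int), r.Pairwise (· ≤ ·) → (∀ x, r.count x ≤ s.count x) →
    ∀ (cnt : PySem.Dict Int Int), (∀ x, cnt.getD x 0 = (r.count x : Int)) →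
    ∀ ans, pvLoopA k s cnt ans = pvLoopB k r ans := by
  intro s
  induction s with
  | nil =>
    intro _ r hr hcount cnt hcnt ans
    have hr0 : r = [] := by
      cases r with
      | nil => rfl
      | cons y ys =>
        have := hcount y
        simp [List.count_cons_self] at this
    subst hr0
    rw [pvLoopB]
    rfl
  | cons v t ih =>
    intro hs r hr hcount cnt hcnt ans
    have hst : t.Pairwise (· ≤ ·) := (List.pairwise_cons.mp hs).2
    have hvle : ∀ y ∈ t, v ≤ y := (List.pairwise_cons.mp hs).1
    have hne2 : v + k * 2 ≠ v := by omega
    by_cases h0 : r.count v = 0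
    · have hA : pvLoopA k (v :: t) cnt ans = pvLoopA k t cnt ans := by
        simp [pvLoopA, hcnt v, h0]
      rw [hA]
      refine ih hst r hr ?_ cnt hcnt ans
      intro x
      by_cases hx : x = v
      · subst hx; omega
      · have := hcount x
        rwa [List.count_cons_of_ne (fun h => hx h.symm)] at this
    · -- v is the head of r
      have hvr : v ∈ r := List.count_pos_iff.mp (Nat.pos_of_ne_zero h0)
      obtain ⟨w, r₁, rfl⟩ : ∃ w r₁, r = w :: r₁ := by
        cases r with
        | nil => simp at hvr
        | cons w r₁ => exact ⟨w, r₁, rfl⟩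
      have hrle : ∀ y ∈ r₁, w ≤ y := (List.pairwise_cons.mp hr).1
      have hr1 : r₁.Pairwise (· ≤ ·) := (List.pairwise_cons.mp hr).2
      have hrmem : ∀ x ∈ w :: r₁, v ≤ x := by
        intro x hx
        have h1 : 0 < (v :: t).count x :=
          lt_of_lt_of_le (List.count_pos_iff.mpr hx) (hcount x)
        have h2 : x ∈ v :: t := List.count_pos_iff.mp h1
        rcases List.mem_cons.mp h2 with h | h
        · omega
        · exact hvle x h
      have hwv : v = w := by
        have h1 : v ≤ w := hrmem w (List.mem_cons_self)
        rcases List.mem_cons.mp hvr with h | h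
        · omega
        · exact le_antisymm h1 (hrle v h)
      subst hwv
      have hc2 : cnt.getD (v + k * 2) 0 = ((r₁.count (v + k * 2) : Nat) : Int) := by
        rw [hcnt (v + k * 2), List.count_cons_of_ne (Ne.symm hne2)]
      have h2k : v + 2 * k = v + k * 2 := by ring
      have h0' : ((List.count v (v :: r₁) : Nat) : Int) ≠ 0 := by
        simp only [List.count_cons_self]; push_cast; omega
      by_cases hp : r₁.count (v + k * 2) = 0
      · -- no partner: both fail
        have hnm : (v + k * 2) ∉ r₁ := List.count_eq_zero.mp hp
        rw [pvLoopB]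
        simp [pvLoopA, hcnt v, hc2, hp, h2k, hnm]
        intro hfalse
        exfalso
        omega
      · have hm : (v + k * 2) ∈ r₁ := List.count_pos_iff.mp (Nat.pos_of_ne_zero hp)
        have hA : pvLoopA k (v :: t) cnt ans
            = pvLoopA k t (pvDec (pvDec cnt v) (v + k * 2)) (ans ++ [v + k]) := by
          simp [pvLoopA, hcnt v, hc2, hp]
          intro hfalse
          exfalso
          omega
        have hB : pvLoopB k (v :: r₁) ans
            = pvLoopB k (r₁.erase (v + k * 2)) (ans ++ [v + k]) := by
          have hm' : (v + 2 * k) ∈ r₁ := by rw [h2k]; exact hm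
          rw [pvLoopB, if_pos (by simpa using hm')]
          split
          · next rest₂ hrem =>
              rw [PySem.List.remove?_eq_some_erase r₁ (v + 2 * k) hm'] at hrem
              cases hrem
              rw [h2k]
          · next hrem =>
              rw [PySem.List.remove?_eq_none_iff] at hrem
              exact absurd hm' hrem
        rw [hA, hB]
        refine ih hst (r₁.erase (v + k * 2)) ?_ ?_ _ ?_ _
        · exact hr1.sublist (List.erase_sublist)
        · intro x
          have hx0 := hcount x
          simp only [List.count_cons, beq_iff_eq] at hx0
          have he : (r₁.erase (v + k * 2)).count x
              = r₁.count x - (if v + k * 2 = x then 1 else 0) := by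
            rw [@List.count_erase _ _ _ x (v + k * 2) r₁]
            simp only [beq_iff_eq]
          rw [he]
          by_cases hxv : v = x
          · have hnp : ¬ (v + k * 2 = x) := by omega
            rw [if_pos hxv] at hx0
            rw [if_neg hnp]
            omega
          · rw [if_neg hxv] at hx0
            by_cases hnp : v + k * 2 = x
            · rw [if_pos hnp]; omega
            · rw [if_neg hnp]; omega
        · intro x
          have he : (r₁.erase (v + k * 2)).count x
              = r₁.count x - (if v + k * 2 = x then 1 else 0) := by
            rw [@List.count_erase _ _ _ x (v + k * 2) r₁]
            simp only [beq_iff_eq]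
          unfold pvDec
          rw [PySem.Dict.getD_insert]
          by_cases hxp : x = v + k * 2
          · rw [if_pos hxp, PySem.Dict.getD_insert, if_neg hne2, hc2, he,
              if_pos hxp.symm]
            have hxx : r₁.count x = r₁.count (v + k * 2) := by rw [hxp]
            have hpos : 0 < r₁.count (v + k * 2) := Nat.pos_of_ne_zero hp
            omega
          · have hne' : ¬ (v + k * 2 = x) := fun h => hxp h.symm
            rw [if_neg hxp, PySem.Dict.getD_insert, he, if_neg hne']
            by_cases hxv : x = v
            · rw [if_pos hxv, hcnt v, List.count_cons_self]
              have hxx : r₁.count x = r₁.count v := by rw [hxv]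
              omega
            · rw [if_neg hxv, hcnt x, List.count_cons_of_ne (fun h => hxv h.symm)]
              omega

theorem pvOuter_eq (s : List Int) (hs : s.Pairwise (· ≤ ·)) (idxs : List Int)
    (hidx : ∀ i ∈ idxs, 1 ≤ i ∧ i < (s.length : Int)) :
    pvOuterA s idxs = pvOuterB s idxs := by
  induction idxs with
  | nil => rfl
  | cons i is ih =>
    obtain ⟨hi1, hi2⟩ := hidx i List.mem_cons_self
    have ihrest : pvOuterA s is = pvOuterB s is :=
      ih (fun j hj => hidx j (List.mem_cons.mpr (Or.inr hj)))
    by_cases hc : (PySem.Int.mod (PySem.List.pyGetD s i 0 - PySem.List.pyGetD s 0 0) 2 == 1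
        || PySem.List.pyGetD s i 0 == PySem.List.pyGetD s (i - 1) 0) = true
    · simp only [pvOuterA, pvOuterB, if_pos hc]
      exact ihrest
    · have ec : PySem.List.pyGetD s i 0 = s[i.toNat]'(by omega) :=
        PySem.List.pyGetD_eq_getElem s 0 (by omega) (by omega)
      have eb : PySem.List.pyGetD s (i - 1) 0 = s[(i - 1).toNat]'(by omega) :=
        PySem.List.pyGetD_eq_getElem s 0 (by omega) (by omega)
      have ea : PySem.List.pyGetD s 0 0 = s[(0 : Int).toNat]'(by omega) :=
        PySem.List.pyGetD_eq_getElem s 0 (by omega) (by omega)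
      have hmono : ∀ (p q : Nat) (hp : p < s.length) (hq : q < s.length), p ≤ q → s[p] ≤ s[q] := by
        intro p q hp hq hpq
        rcases Nat.lt_or_eq_of_le hpq with h | h
        · exact List.pairwise_iff_getElem.mp hs p q hp hq h
        · subst h; exact le_refl _
      have hk : 0 < PySem.Int.floordiv (PySem.List.pyGetD s i 0 - PySem.List.pyGetD s 0 0) 2 := by
        simp only [Bool.or_eq_true, beq_iff_eq, not_or] at hc
        obtain ⟨hm, hne⟩ := hc
        rw [ec, ea] at hm ⊢
        rw [ec, eb] at hne
        have hab : s[(0 : Int).toNat]'(by omega) ≤ s[(i - 1).toNat]'(by omega) :=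
          hmono _ _ (by omega) (by omega) (by omega)
        have hbc : s[(i - 1).toNat]'(by omega) ≤ s[i.toNat]'(by omega) :=
          hmono _ _ (by omega) (by omega) (by omega)
        have hd : 0 < s[i.toNat]'(by omega) - s[(0 : Int).toNat]'(by omega) := by omega
        rcases PySem.Int.mod_two_eq (s[i.toNat]'(by omega) - s[(0 : Int).toNat]'(by omega)) with h | h
        · obtain ⟨m, hm2⟩ := (PySem.Int.mod_eq_zero_iff_dvd _ 2).mp h
          rw [PySem.Int.floordiv_eq_ediv_of_pos (by norm_num), hm2,
            Int.mul_ediv_cancel_left _ (by norm_num)]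
          omega
        · exact absurd h hm
      have hloop := pvLoop_eq _ hk s hs s hs (fun x => le_refl _) (PySem.Dict.counter s)
        (fun x => PySem.Dict.getD_counter s x) []
      simp only [pvOuterA, pvOuterB, if_neg hc]
      rw [hloop, ihrest]

-- ===== VERDICT (by name: the statement is the Claim_ definition above) =====
theorem recoverArray_spec : Claim_equal_recoverArray := by
  intro nums _
  unfold Spec_recoverArray recoverArray recoverArray_alt
  exact pvOuter_eq _ (PySem.List.sorted_pairwise nums (fun x => x)) _
    (fun i hi => PySem.List.mem_pyRange_one.mp hi)
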